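-- pv_equiv track=rewrite | github.com/An-Aw3x/python-homeworks | homework5.py | missed_primes
-- ===== SOURCE A (Python) =====
-- import random, math
--
-- def is_prime(n):
--     if n < 2:
--         return False
--     for i in range(2, int(math.sqrt(n)) + 1): # Basically copied from Assignment 3 teehee (except this time i used the math module!!!)
--         if n % i == 0:
--             return False
--     return True
--
-- def missed_primes(tickets):
--     missing_primes = []
--     all_primes = set()
--
--     for ticket in tickets:
--         for number in ticket:
--             if is_prime(number):
--                 all_primes.add(number)
--
--     for primes in range(2, 50):
--         if primes not in all_primes and is_prime(primes):
--             missing_primes.append(primes)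
--
--     return missing_primes
-- ===== SOURCE B (Python) =====
-- def missed_primes(tickets):
--     # Sieve of Eratosthenes for numbers below 50, then eliminate numbers seen in tickets.
--     sieve = [True] * 50
--     sieve[0] = sieve[1] = False
--     for i in range(2, 8):
--         if sieve[i]:
--             for j in range(i * i, 50, i):
--                 sieve[j] = False
--     missing = {p for p in range(2, 50) if sieve[p]}
--     for ticket in tickets:
--         for number in ticket:
--             missing.discard(number)
--     return [p for p in range(2, 50) if p in missing]
-- ===== Notes on version B (the rewrite author's own statement) =====
-- stated objective: alternative
-- what changed: B precomputes the primes below 50 once with a Sieve of Eratosthenes and starts from the full set, discarding every number seen in the tickets, instead of A's per-number trial-division is_prime test plus a collect-then-check pass.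
import Mathlib
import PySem

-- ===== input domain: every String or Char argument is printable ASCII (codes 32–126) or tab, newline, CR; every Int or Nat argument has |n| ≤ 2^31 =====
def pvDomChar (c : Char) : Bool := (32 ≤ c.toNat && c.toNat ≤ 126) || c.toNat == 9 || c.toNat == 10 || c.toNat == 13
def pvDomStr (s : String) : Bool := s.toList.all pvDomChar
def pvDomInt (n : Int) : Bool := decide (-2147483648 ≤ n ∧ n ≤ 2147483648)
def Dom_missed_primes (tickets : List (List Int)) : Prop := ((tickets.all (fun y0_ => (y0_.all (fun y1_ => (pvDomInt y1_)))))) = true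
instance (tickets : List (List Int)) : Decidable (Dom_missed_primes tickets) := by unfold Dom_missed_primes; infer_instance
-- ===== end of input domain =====

-- B differs: sieve-of-Eratosthenes table + start-full-and-discard, instead of A's per-number
-- trial division and collect-then-check.  Return values proved equal on all inputs.

-- ===== PORT A =====
-- int(math.sqrt(n)), ported as Newton's integer square-root iteration with fuel 64
-- (kernel-reducible; exact on the domain 0 ≤ n ≤ 2^31, where the correctly rounded
-- double sqrt of Python agrees with the integer square root)
def pvSqrtGo : Nat → Nat → Nat → Nat
  | 0, x, _ => x
  | fuel + 1, x, n =>
    let y := (x + n / x) / 2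
    if y < x then pvSqrtGo fuel y n else x

def pvSqrt (n : Nat) : Nat := pvSqrtGo 64 n n

def is_prime (n : Int) : Bool :=
  if n < 2 then false
  else (PySem.List.pyRange 2 ((pvSqrt n.toNat : Int) + 1) 1).all
    (fun i => !(PySem.Int.mod n i == 0))

def missed_primes (tickets : List (List Int)) : List Int :=
  let all_primes : PySem.Set Int :=
    tickets.foldl (fun s ticket =>
      ticket.foldl (fun s number =>
        if is_prime number then PySem.Set.add s number else s) s) PySem.Set.empty
  (PySem.List.pyRange 2 50 1).foldl (fun acc p =>
    if !(PySem.Set.contains all_primes p) && is_prime p then acc ++ [p] else acc) []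

-- ===== PORT B =====
-- sieve[0..49]: sieve[k] = true iff k is prime (built exactly as in Source B)
def pvSieve : List Bool :=
  let s := PySem.List.pySetD (PySem.List.pySetD (List.replicate 50 true) 0 false) 1 false
  (PySem.List.pyRange 2 8 1).foldl (fun s i =>
    if PySem.List.pyGetD s i false then
      (PySem.List.pyRange (i * i) 50 i).foldl (fun s j => PySem.List.pySetD s j false) s
    else s) s

-- B's initial 'missing' set: the comprehension {p for p in range(2,50) if sieve[p]}
def pvMissing0 : PySem.Set Int :=
  (PySem.List.pyRange 2 50 1).foldl (fun s p =>
    if PySem.List.pyGetD pvSieve p false then PySem.Set.add s p else s) PySem.Set.empty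

def missed_primes_alt (tickets : List (List Int)) : List Int :=
  let missing :=
    tickets.foldl (fun s ticket =>
      ticket.foldl (fun s number => PySem.Set.discard s number) s) pvMissing0
  (PySem.List.pyRange 2 50 1).foldl (fun acc p =>
    if PySem.Set.contains missing p then acc ++ [p] else acc) []

-- ===== PRECONDITION & SPEC =====
def Spec_missed_primes (tickets : List (List Int)) (out : List Int) : Prop := out = missed_primes_alt tickets
instance (tickets : List (List Int)) (out : List Int) : Decidable (Spec_missed_primes tickets out) := by unfold Spec_missed_primes; infer_instance

-- ===== CLAIM (what is proved, stated in full; the proofs are below) =====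
def Claim_equal_missed_primes : Prop := ∀ (tickets : List (List Int)), Dom_missed_primes tickets → Spec_missed_primes tickets (missed_primes tickets)

-- ===== LEMMAS AND PROOFS =====

-- membership in A's inner prime-collecting fold
theorem memA_inner (t : List Int) (s : PySem.Set Int) (n : Int) :
    n ∈ t.foldl (fun s number => if is_prime number then PySem.Set.add s number else s) s ↔
      n ∈ s ∨ (is_prime n = true ∧ n ∈ t) := by
  induction t generalizing s with
  | nil => simp
  | cons m t ih =>
    simp only [List.foldl_cons, ih, List.mem_cons]
    split_ifs with hm
    · simp only [PySem.Set.mem_add]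
      constructor
      · rintro (⟨h | rfl⟩ | h)
        · exact Or.inl h
        · exact Or.inr ⟨hm, Or.inl rfl⟩
        · exact Or.inr ⟨h.1, Or.inr h.2⟩
      · rintro (h | ⟨hp, rfl | h⟩)
        · exact Or.inl (Or.inl h)
        · exact Or.inl (Or.inr rfl)
        · exact Or.inr ⟨hp, h⟩
    · constructor
      · rintro (h | h)
        · exact Or.inl h
        · exact Or.inr ⟨h.1, Or.inr h.2⟩
      · rintro (h | ⟨hp, rfl | h⟩)
        · exact Or.inl h
        · exact absurd hp (by simpa using hm)
        · exact Or.inr ⟨hp, h⟩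

theorem memA (tickets : List (List Int)) (s : PySem.Set Int) (n : Int) :
    n ∈ tickets.foldl (fun s ticket =>
        ticket.foldl (fun s number => if is_prime number then PySem.Set.add s number else s) s) s ↔
      n ∈ s ∨ (is_prime n = true ∧ ∃ t ∈ tickets, n ∈ t) := by
  induction tickets generalizing s with
  | nil => simp
  | cons t ts ih =>
    simp only [List.foldl_cons, ih, memA_inner, List.mem_cons]
    constructor
    · rintro ((h | ⟨hp, h⟩) | ⟨hp, u, hu, hn⟩)
      · exact Or.inl h
      · exact Or.inr ⟨hp, t, Or.inl rfl, h⟩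
      · exact Or.inr ⟨hp, u, Or.inr hu, hn⟩
    · rintro (h | ⟨hp, u, rfl | hu, hn⟩)
      · exact Or.inl (Or.inl h)
      · exact Or.inl (Or.inr ⟨hp, hn⟩)
      · exact Or.inr ⟨hp, u, hu, hn⟩

-- membership in B's inner discarding fold
theorem memB_inner (t : List Int) (s : PySem.Set Int) (n : Int) :
    n ∈ t.foldl (fun s number => PySem.Set.discard s number) s ↔ n ∈ s ∧ n ∉ t := by
  induction t generalizing s with
  | nil => simp
  | cons m t ih =>
    simp only [List.foldl_cons, ih, PySem.Set.mem_discard, List.mem_cons]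
    tauto

theorem memB (tickets : List (List Int)) (s : PySem.Set Int) (n : Int) :
    n ∈ tickets.foldl (fun s ticket =>
        ticket.foldl (fun s number => PySem.Set.discard s number) s) s ↔
      n ∈ s ∧ ¬ ∃ t ∈ tickets, n ∈ t := by
  induction tickets generalizing s with
  | nil => simp
  | cons t ts ih =>
    simp only [List.foldl_cons, ih, memB_inner, List.mem_cons]
    constructor
    · rintro ⟨⟨hs, hnt⟩, h⟩
      refine ⟨hs, ?_⟩
      rintro ⟨u, rfl | hu, hn⟩
      · exact hnt hn
      · exact h ⟨u, hu, hn⟩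
    · rintro ⟨hs, h⟩
      exact ⟨⟨hs, fun hn => h ⟨t, Or.inl rfl, hn⟩⟩, fun ⟨u, hu, hn⟩ => h ⟨u, Or.inr hu, hn⟩⟩

-- agreement of the sieve set with A's primality test on 2..49 (finite check)
set_option maxRecDepth 8000 in
theorem pvMissing0_prime : ∀ p ∈ PySem.List.pyRange 2 50 1,
    (decide (p ∈ pvMissing0) = is_prime p) := by decide

set_option maxRecDepth 4096 in
theorem missed_primes_spec' (tickets : List (List Int)) :
    missed_primes tickets = missed_primes_alt tickets := by
  simp only [missed_primes, missed_primes_alt, PySem.List.foldl_append_if_eq_filter,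
    List.nil_append]
  refine List.filter_congr ?_
  intro p hp
  have hm0 : p ∈ pvMissing0 ↔ is_prime p = true := by
    rw [← pvMissing0_prime p hp]; simp
  have hA := memA tickets PySem.Set.empty p
  have hB := memB tickets pvMissing0 p
  simp only [PySem.Set.empty, List.not_mem_nil, false_or] at hA
  rw [Bool.eq_iff_iff]
  simp only [Bool.and_eq_true, Bool.not_eq_true', ← Bool.not_eq_true,
    PySem.Set.contains_iff, PySem.Set.empty, hA, hB, hm0]
  constructor
  · rintro ⟨h1, h2⟩; exact ⟨h2, fun h => h1 ⟨h2, h⟩⟩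
  · rintro ⟨h1, h2⟩; exact ⟨fun h => h2 h.2, h1⟩

-- ===== VERDICT (by name: the statement is the Claim_ definition above) =====
theorem missed_primes_spec : Claim_equal_missed_primes := by
  intro tickets _
  exact missed_primes_spec' tickets
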